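-- pv_equiv track=rewrite | github.com/Batcat72/OSINT | main.py | detect_platforms
-- ===== SOURCE A (Python) =====
-- def detect_platforms(links):
--     platforms = {"instagram": [], "github": [], "twitter": [], "facebook": [], "linkedin": []}
--     for link in links:
--         l = link.lower()
--         if "instagram.com/" in l:
--             platforms["instagram"].append(link)
--         elif "github.com/" in l:
--             platforms["github"].append(link)
--         elif "twitter.com/" in l or "x.com/" in l:
--             platforms["twitter"].append(link)
--         elif "facebook.com/" in l:
--             platforms["facebook"].append(link)
--         elif "linkedin.com/in/" in l:
--             platforms["linkedin"].append(link)
--     return platforms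
-- ===== SOURCE B (Python) =====
-- TABLE = [
--     ("instagram", ["instagram.com/"]),
--     ("github", ["github.com/"]),
--     ("twitter", ["twitter.com/", "x.com/"]),
--     ("facebook", ["facebook.com/"]),
--     ("linkedin", ["linkedin.com/in/"]),
-- ]
--
-- def detect_platforms(links):
--     lowered = [(link, link.lower()) for link in links]
--     result = {}
--     seen = []
--     for name, pats in TABLE:
--         result[name] = [link for link, l in lowered
--                         if any(p in l for p in pats)
--                         and not any(q in l for q in seen)]
--         seen.extend(pats)
--     return result
-- ===== Notes on version B (the rewrite author's own statement) =====
-- stated objective: alternative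
-- what changed: Replaces the per-link if/elif dispatch that appends into a mutable dict with a data-driven pass per bucket: each bucket's list is built in one filter over the pre-lowered links, excluding links caught by earlier buckets' patterns.
import Mathlib
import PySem

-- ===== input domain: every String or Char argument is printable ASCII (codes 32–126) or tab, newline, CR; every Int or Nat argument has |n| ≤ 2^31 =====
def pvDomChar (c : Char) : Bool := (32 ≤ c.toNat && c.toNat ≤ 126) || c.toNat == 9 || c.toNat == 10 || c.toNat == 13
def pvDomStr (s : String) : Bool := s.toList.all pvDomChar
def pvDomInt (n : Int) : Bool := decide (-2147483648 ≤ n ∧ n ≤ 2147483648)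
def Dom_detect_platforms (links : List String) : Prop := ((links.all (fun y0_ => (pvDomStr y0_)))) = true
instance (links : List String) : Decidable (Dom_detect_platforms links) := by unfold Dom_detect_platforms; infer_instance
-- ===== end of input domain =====

-- B replaces A's per-link if/elif dispatch into a mutable dict by a data-driven table of
-- (bucket, patterns) with one filter pass per bucket (alternative decomposition, same cost).


-- ===== PORT A =====
def pvStepA (d : PySem.Dict String (List String)) (link : String) : PySem.Dict String (List String) :=
  let l := PySem.Str.lower link
  if PySem.Str.isIn "instagram.com/" l then d.modify "instagram" [] (· ++ [link])
  else if PySem.Str.isIn "github.com/" l then d.modify "github" [] (· ++ [link])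
  else if PySem.Str.isIn "twitter.com/" l || PySem.Str.isIn "x.com/" l then d.modify "twitter" [] (· ++ [link])
  else if PySem.Str.isIn "facebook.com/" l then d.modify "facebook" [] (· ++ [link])
  else if PySem.Str.isIn "linkedin.com/in/" l then d.modify "linkedin" [] (· ++ [link])
  else d

def detect_platforms (links : List String) : List (String × List String) :=
  (links.foldl pvStepA
    (PySem.Dict.ofList
      [("instagram", []), ("github", []), ("twitter", []), ("facebook", []), ("linkedin", [])])).items

-- ===== PORT B =====
def pvTable : List (String × List String) :=
  [("instagram", ["instagram.com/"]), ("github", ["github.com/"]),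
   ("twitter", ["twitter.com/", "x.com/"]), ("facebook", ["facebook.com/"]),
   ("linkedin", ["linkedin.com/in/"])]

def detect_platforms_alt (links : List String) : List (String × List String) :=
  let lowered := links.map (fun link => (link, PySem.Str.lower link))
  (pvTable.foldl
    (fun (st : PySem.Dict String (List String) × List String) row =>
      (st.1.insert row.1
        ((lowered.filter (fun p =>
            row.2.any (fun q => PySem.Str.isIn q p.2) &&
            !(st.2.any (fun q => PySem.Str.isIn q p.2)))).map (·.1)),
       st.2 ++ row.2))
    (PySem.Dict.empty, [])).1.items

-- ===== PRECONDITION & SPEC =====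
def Spec_detect_platforms (links : List String) (out : List (String × List String)) : Prop := out = detect_platforms_alt links
instance (links : List String) (out : List (String × List String)) : Decidable (Spec_detect_platforms links out) := by unfold Spec_detect_platforms; infer_instance

-- ===== CLAIM (what is proved, stated in full; the proofs are below) =====
def Claim_equal_detect_platforms : Prop := ∀ (links : List String), Dom_detect_platforms links → Spec_detect_platforms links (detect_platforms links)

-- ===== LEMMAS AND PROOFS =====

-- "link goes to the bucket with patterns `pats`, none of the earlier patterns `seen` matching"
def pvBucket (pats seen : List String) (s : String) : Bool :=
  pats.any (fun q => PySem.Str.isIn q (PySem.Str.lower s)) &&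
  !(seen.any (fun q => PySem.Str.isIn q (PySem.Str.lower s)))

def pvI : String → Bool := pvBucket ["instagram.com/"] []
def pvG : String → Bool := pvBucket ["github.com/"] ["instagram.com/"]
def pvT : String → Bool := pvBucket ["twitter.com/", "x.com/"] ["instagram.com/", "github.com/"]
def pvF : String → Bool := pvBucket ["facebook.com/"] ["instagram.com/", "github.com/", "twitter.com/", "x.com/"]
def pvL : String → Bool := pvBucket ["linkedin.com/in/"] ["instagram.com/", "github.com/", "twitter.com/", "x.com/", "facebook.com/"]

lemma pvFilterLowered (pats seen : List String) (links : List String) :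
    ((links.map (fun s => (s, PySem.Str.lower s))).filter (fun pr =>
        pats.any (fun q => PySem.Str.isIn q pr.2) &&
        !(seen.any (fun q => PySem.Str.isIn q pr.2)))).map (·.1)
    = links.filter (pvBucket pats seen) := by
  induction links with
  | nil => rfl
  | cons a as ih =>
    simp only [List.map_cons, List.filter_cons]
    cases h : pvBucket pats seen a
    · rw [if_neg (by simpa [pvBucket] using h), if_neg (by simpa [pvBucket] using h), ih]
    · rw [if_pos (by simpa [pvBucket] using h), if_pos (by simpa [pvBucket] using h),
        List.map_cons, ih]

lemma pvAltEq (links : List String) :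
    detect_platforms_alt links =
      [("instagram", links.filter pvI), ("github", links.filter pvG),
       ("twitter", links.filter pvT), ("facebook", links.filter pvF),
       ("linkedin", links.filter pvL)] := by
  have hitems : ∀ v1 v2 v3 v4 v5 : List String,
      ((((((PySem.Dict.empty : PySem.Dict String (List String)).insert "instagram" v1).insert
        "github" v2).insert "twitter" v3).insert "facebook" v4).insert "linkedin" v5).items =
      [("instagram", v1), ("github", v2), ("twitter", v3), ("facebook", v4), ("linkedin", v5)] := by
    intro v1 v2 v3 v4 v5
    simp [PySem.Dict.insert, PySem.Dict.contains, PySem.Dict.empty]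
  simp only [detect_platforms_alt, pvTable, List.foldl_cons, List.foldl_nil, hitems,
    pvFilterLowered]
  rfl

lemma pvLoopA (links : List String) (i g t f l : List String) :
    links.foldl pvStepA (PySem.Dict.mk
      [("instagram", i), ("github", g), ("twitter", t), ("facebook", f), ("linkedin", l)]) =
    PySem.Dict.mk
      [("instagram", i ++ links.filter pvI), ("github", g ++ links.filter pvG),
       ("twitter", t ++ links.filter pvT), ("facebook", f ++ links.filter pvF),
       ("linkedin", l ++ links.filter pvL)] := by
  induction links generalizing i g t f l with
  | nil => simp
  | cons x xs ih =>
    have hmI : ∀ i g t f l : List String,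
        (PySem.Dict.mk [("instagram", i), ("github", g), ("twitter", t), ("facebook", f), ("linkedin", l)]).modify "instagram" [] (· ++ [x]) =
        PySem.Dict.mk [("instagram", i ++ [x]), ("github", g), ("twitter", t), ("facebook", f), ("linkedin", l)] := by
      intro i g t f l
      simp [PySem.Dict.modify, PySem.Dict.insert, PySem.Dict.contains, PySem.Dict.getD, PySem.Dict.get?]
    have hmG : ∀ i g t f l : List String,
        (PySem.Dict.mk [("instagram", i), ("github", g), ("twitter", t), ("facebook", f), ("linkedin", l)]).modify "github" [] (· ++ [x]) =
        PySem.Dict.mk [("instagram", i), ("github", g ++ [x]), ("twitter", t), ("facebook", f), ("linkedin", l)] := by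
      intro i g t f l
      simp [PySem.Dict.modify, PySem.Dict.insert, PySem.Dict.contains, PySem.Dict.getD, PySem.Dict.get?]
    have hmT : ∀ i g t f l : List String,
        (PySem.Dict.mk [("instagram", i), ("github", g), ("twitter", t), ("facebook", f), ("linkedin", l)]).modify "twitter" [] (· ++ [x]) =
        PySem.Dict.mk [("instagram", i), ("github", g), ("twitter", t ++ [x]), ("facebook", f), ("linkedin", l)] := by
      intro i g t f l
      simp [PySem.Dict.modify, PySem.Dict.insert, PySem.Dict.contains, PySem.Dict.getD, PySem.Dict.get?]
    have hmF : ∀ i g t f l : List String,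
        (PySem.Dict.mk [("instagram", i), ("github", g), ("twitter", t), ("facebook", f), ("linkedin", l)]).modify "facebook" [] (· ++ [x]) =
        PySem.Dict.mk [("instagram", i), ("github", g), ("twitter", t), ("facebook", f ++ [x]), ("linkedin", l)] := by
      intro i g t f l
      simp [PySem.Dict.modify, PySem.Dict.insert, PySem.Dict.contains, PySem.Dict.getD, PySem.Dict.get?]
    have hmL : ∀ i g t f l : List String,
        (PySem.Dict.mk [("instagram", i), ("github", g), ("twitter", t), ("facebook", f), ("linkedin", l)]).modify "linkedin" [] (· ++ [x]) =
        PySem.Dict.mk [("instagram", i), ("github", g), ("twitter", t), ("facebook", f), ("linkedin", l ++ [x])] := by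
      intro i g t f l
      simp [PySem.Dict.modify, PySem.Dict.insert, PySem.Dict.contains, PySem.Dict.getD, PySem.Dict.get?]
    cases hI : PySem.Str.isIn "instagram.com/" (PySem.Str.lower x) <;>
    cases hG : PySem.Str.isIn "github.com/" (PySem.Str.lower x) <;>
    cases hT : PySem.Str.isIn "twitter.com/" (PySem.Str.lower x) <;>
    cases hX : PySem.Str.isIn "x.com/" (PySem.Str.lower x) <;>
    cases hF : PySem.Str.isIn "facebook.com/" (PySem.Str.lower x) <;>
    cases hL : PySem.Str.isIn "linkedin.com/in/" (PySem.Str.lower x) <;>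
      simp only [List.foldl_cons, pvStepA, List.filter_cons, pvI, pvG, pvT, pvF, pvL, pvBucket,
        List.any_cons, List.any_nil, hI, hG, hT, hX, hF, hL,
        Bool.or_false, Bool.or_true, Bool.false_or, Bool.true_or, Bool.or_self,
        Bool.and_false, Bool.and_true, Bool.false_and, Bool.true_and, Bool.and_self,
        Bool.not_false, Bool.not_true, Bool.false_eq_true, if_false, if_true,
        hmI, hmG, hmT, hmF, hmL, ih] <;>
      simp [List.append_assoc]

-- ===== VERDICT (by name: the statement is the Claim_ definition above) =====
theorem detect_platforms_spec : Claim_equal_detect_platforms := by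
  intro links _
  unfold Spec_detect_platforms
  rw [pvAltEq]
  show (links.foldl pvStepA (PySem.Dict.mk
    [("instagram", []), ("github", []), ("twitter", []), ("facebook", []), ("linkedin", [])])).items = _
  rw [pvLoopA]
  simp [PySem.Dict.items]
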